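-- pv_equiv track=rewrite | github.com/noriyuki1113/ai-impact-brief | scripts/generate_today.py | pick_three_diverse
-- ===== SOURCE A (Python) =====
-- def pick_three_diverse(cands):
--     """
--     3枠（market/policy/tech）を優先しつつ、
--     同一sourceは最大1本
--     """
--     picked = []
--     used_sources = set()
--
--     # まず枠を埋める
--     for bucket in ["market", "policy", "tech"]:
--         for it in cands:
--             if it["source"] in used_sources:
--                 continue
--             if it["bucket"] != bucket:
--                 continue
--             picked.append(it)
--             used_sources.add(it["source"])
--             break
--
--     # 足りない分は新しい順で埋める
--     if len(picked) < 3: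
--         for it in cands:
--             if it["source"] in used_sources:
--                 continue
--             picked.append(it)
--             used_sources.add(it["source"])
--             if len(picked) == 3:
--                 break
--
--     return picked[:3]
-- ===== SOURCE B (Python) =====
-- def pick_three_diverse(cands):
--     """
--     3枠（market/policy/tech）を優先しつつ、
--     同一sourceは最大1本
--     """
--     # group items by bucket once, keeping original order within each bucket
--     groups = {}
--     for it in cands:
--         groups.setdefault(it["bucket"], []).append(it)
--
--     picked = []
--     used_sources = set()
--
--     for bucket in ["market", "policy", "tech"]:
--         for it in groups.get(bucket, []):
--             if it["source"] not in used_sources: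
--                 picked.append(it)
--                 used_sources.add(it["source"])
--                 break
--
--     # top up to 3 from the full list, newest first
--     for it in cands:
--         if len(picked) == 3:
--             break
--         if it["source"] not in used_sources:
--             picked.append(it)
--             used_sources.add(it["source"])
--
--     return picked
-- ===== Notes on version B (the rewrite author's own statement) =====
-- stated objective: idiomatic
-- what changed: B groups the candidates by bucket in one pass into a dict of ordered lists, so each bucket slot scans only its own group instead of rescanning the whole candidate list, and the top-up loop checks the 3-limit up front so no final slice is needed.
import Mathlib
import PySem

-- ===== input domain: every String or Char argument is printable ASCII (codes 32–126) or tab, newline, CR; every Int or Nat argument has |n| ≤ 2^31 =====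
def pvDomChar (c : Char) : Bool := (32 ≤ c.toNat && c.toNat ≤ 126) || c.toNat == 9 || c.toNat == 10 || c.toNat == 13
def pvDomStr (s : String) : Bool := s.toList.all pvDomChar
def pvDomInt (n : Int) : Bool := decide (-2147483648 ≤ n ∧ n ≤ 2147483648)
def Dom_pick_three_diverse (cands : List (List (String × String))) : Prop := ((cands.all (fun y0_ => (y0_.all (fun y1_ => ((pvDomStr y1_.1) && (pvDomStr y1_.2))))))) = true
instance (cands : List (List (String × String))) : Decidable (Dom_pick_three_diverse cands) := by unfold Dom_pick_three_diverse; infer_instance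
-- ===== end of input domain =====

-- B groups the candidates by bucket once (dict of ordered lists) so each bucket slot scans
-- only its own group instead of rescanning the whole list; equal return value on Pre_.

-- it[k] for a dict with string values; total stand-in: "" where Python raises KeyError (excluded by Pre_)
def pvGet (it : List (String × String)) (k : String) : String :=
  ((PySem.Dict.mk it).get? k).getD ""

-- ===== PORT A =====
-- inner 'for it in cands: … break' of the bucket loop
def pvBucketScanA (b : String) :
    List (List (String × String)) → List (List (String × String)) → PySem.Set String →
    List (List (String × String)) × PySem.Set String
  | [], picked, used => (picked, used)
  | it :: rest, picked, used =>
    if PySem.Set.contains used (pvGet it "source") then pvBucketScanA b rest picked used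
    else if pvGet it "bucket" ≠ b then pvBucketScanA b rest picked used
    else (picked ++ [it], PySem.Set.add used (pvGet it "source"))

-- the fallback 'for it in cands: … if len(picked) == 3: break'
def pvFillA :
    List (List (String × String)) → List (List (String × String)) → PySem.Set String →
    List (List (String × String))
  | [], picked, _ => picked
  | it :: rest, picked, used =>
    if PySem.Set.contains used (pvGet it "source") then pvFillA rest picked used
    else
      let picked' := picked ++ [it]
      if picked'.length == 3 then picked'
      else pvFillA rest picked' (PySem.Set.add used (pvGet it "source"))

def pick_three_diverse (cands : List (List (String × String))) : List (List (String × String)) :=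
  let s := (["market", "policy", "tech"] : List String).foldl
    (fun (s : List (List (String × String)) × PySem.Set String) b => pvBucketScanA b cands s.1 s.2)
    ([], PySem.Set.empty)
  let picked := if s.1.length < 3 then pvFillA cands s.1 s.2 else s.1
  picked.take 3

-- ===== PORT B =====
-- one grouping pass: groups.setdefault(it["bucket"], []).append(it)
def pvGroups (cands : List (List (String × String))) :
    PySem.Dict String (List (List (String × String))) :=
  cands.foldl (fun g it => g.modify (pvGet it "bucket") [] (· ++ [it])) PySem.Dict.empty

-- first item of a group whose source is unused
def pvFirstUnused :
    List (List (String × String)) → PySem.Set String → Option (List (String × String))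
  | [], _ => none
  | it :: rest, used =>
    if PySem.Set.contains used (pvGet it "source") then pvFirstUnused rest used
    else some it

-- top-up loop: stop as soon as 3 are picked
def pvFillB :
    List (List (String × String)) → List (List (String × String)) → PySem.Set String →
    List (List (String × String))
  | [], picked, _ => picked
  | it :: rest, picked, used =>
    if picked.length == 3 then picked
    else if PySem.Set.contains used (pvGet it "source") then pvFillB rest picked used
    else pvFillB rest (picked ++ [it]) (PySem.Set.add used (pvGet it "source"))

def pvBucketStepB (g : PySem.Dict String (List (List (String × String))))
    (s : List (List (String × String)) × PySem.Set String) (b : String) :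
    List (List (String × String)) × PySem.Set String :=
  match pvFirstUnused (g.getD b []) s.2 with
  | none => s
  | some it => (s.1 ++ [it], PySem.Set.add s.2 (pvGet it "source"))

def pick_three_diverse_alt (cands : List (List (String × String))) : List (List (String × String)) :=
  let g := pvGroups cands
  let s := (["market", "policy", "tech"] : List String).foldl (pvBucketStepB g) ([], PySem.Set.empty)
  pvFillB cands s.1 s.2

-- ===== PRECONDITION & SPEC =====
-- Pre_ requires every candidate dict to contain both keys "source" and "bucket": Python A raises
-- KeyError whenever a reached item lacks "source"; on an item lacking only "bucket" whose source is
-- already used, A happens to return while B's grouping pass raises KeyError, so those are excluded too.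
def Pre_pick_three_diverse (cands : List (List (String × String))) : Prop :=
  ∀ it ∈ cands, (PySem.Dict.mk it).contains "source" = true ∧ (PySem.Dict.mk it).contains "bucket" = true
instance (cands : List (List (String × String))) : Decidable (Pre_pick_three_diverse cands) := by
  unfold Pre_pick_three_diverse; infer_instance

def pvWitness_pick_three_diverse : (List (List (String × String))) :=
  [[("source", "s1"), ("bucket", "market")], [("source", "s2"), ("bucket", "tech")]]

def Spec_pick_three_diverse (cands : List (List (String × String))) (out : List (List (String × String))) : Prop := out = pick_three_diverse_alt cands
instance (cands : List (List (String × String))) (out : List (List (String × String))) : Decidable (Spec_pick_three_diverse cands out) := by unfold Spec_pick_three_diverse; infer_instance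

-- ===== CLAIM (what is proved, stated in full; the proofs are below) =====
def Claim_equal_pick_three_diverse : Prop := ∀ (cands : List (List (String × String))), Dom_pick_three_diverse cands → Pre_pick_three_diverse cands → Spec_pick_three_diverse cands (pick_three_diverse cands)

-- ===== LEMMAS AND PROOFS =====

-- grouping pass = ordered filter by bucket
theorem pvGroups_getD (cands : List (List (String × String))) (b : String) :
    (pvGroups cands).getD b [] = cands.filter (fun it => pvGet it "bucket" == b) := by
  have h : pvGroups cands
      = (cands.map (fun it => (pvGet it "bucket", it))).foldl
          (fun d p => d.modify p.1 [] (· ++ [p.2])) PySem.Dict.empty := by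
    simp [pvGroups, List.foldl_map]
  rw [h, PySem.Dict.getD_foldl_modify_append]
  simp [PySem.Dict.getD_empty, List.filter_map, Function.comp_def]

-- A's inner bucket scan in terms of the first unused-source item of the bucket's group
theorem pvBucketScanA_eq (b : String) (cands picked : List (List (String × String)))
    (used : PySem.Set String) :
    pvBucketScanA b cands picked used
      = match pvFirstUnused (cands.filter (fun it => pvGet it "bucket" == b)) used with
        | none => (picked, used)
        | some it => (picked ++ [it], PySem.Set.add used (pvGet it "source")) := by
  induction cands with
  | nil => simp [pvBucketScanA, pvFirstUnused]
  | cons it rest ih =>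
    by_cases hu : pvGet it "source" ∈ used
    · by_cases hb : pvGet it "bucket" = b
      · simp [pvBucketScanA, pvFirstUnused, hu, hb, ih]
      · simp [pvBucketScanA, hu, hb, ih]
    · by_cases hb : pvGet it "bucket" = b
      · simp [pvBucketScanA, pvFirstUnused, hu, hb]
      · simp [pvBucketScanA, hu, hb, ih]

theorem pvBucketStep_eq (cands : List (List (String × String)))
    (s : List (List (String × String)) × PySem.Set String) (b : String) :
    pvBucketScanA b cands s.1 s.2 = pvBucketStepB (pvGroups cands) s b := by
  rw [pvBucketStepB, pvGroups_getD, pvBucketScanA_eq]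

-- the bucket scan adds at most one item
theorem pvBucketScanA_len (b : String) (cands picked : List (List (String × String)))
    (used : PySem.Set String) :
    (pvBucketScanA b cands picked used).1.length ≤ picked.length + 1 := by
  rw [pvBucketScanA_eq]
  cases pvFirstUnused (cands.filter (fun it => pvGet it "bucket" == b)) used <;> simp

-- the two fallback loops agree when at most 3 items are picked so far
theorem pvFill_eq (cands : List (List (String × String))) :
    ∀ (picked : List (List (String × String))) (used : PySem.Set String),
      picked.length ≤ 3 →
      pvFillB cands picked used
        = (if picked.length < 3 then pvFillA cands picked used else picked).take 3 := by
  induction cands with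
  | nil =>
    intro picked used h
    by_cases h3 : picked.length < 3 <;>
      simp [pvFillA, pvFillB, h3, List.take_of_length_le, h]
  | cons it rest ih =>
    intro picked used h
    by_cases h3 : picked.length = 3
    · simp [pvFillB, h3, List.take_of_length_le h]
    · have hlt : picked.length < 3 := by omega
      by_cases hu : pvGet it "source" ∈ used
      · rw [show pvFillB (it :: rest) picked used = pvFillB rest picked used from by
            simp [pvFillB, h3, hu],
          show pvFillA (it :: rest) picked used = pvFillA rest picked used from by
            simp [pvFillA, hu]]
        exact ih picked used h
      · have hle : (picked ++ [it]).length ≤ 3 := by simp; omega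
        have hA : pvFillA (it :: rest) picked used
            = if ((picked ++ [it]).length == 3) = true then picked ++ [it]
              else pvFillA rest (picked ++ [it]) (PySem.Set.add used (pvGet it "source")) := by
          simp [pvFillA, hu]
        have hB : pvFillB (it :: rest) picked used
            = pvFillB rest (picked ++ [it]) (PySem.Set.add used (pvGet it "source")) := by
          simp [pvFillB, h3, hu]
        rw [hB, ih _ _ hle, hA, if_pos hlt]
        by_cases h2 : picked.length + 1 = 3
        · have c1 : ¬ (picked ++ [it]).length < 3 := by simp; omega
          have c2 : ((picked ++ [it]).length == 3) = true := by simp; omega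
          rw [if_neg c1, if_pos c2]
        · have c1 : (picked ++ [it]).length < 3 := by simp; omega
          have c2 : ¬ ((picked ++ [it]).length == 3) = true := by simp; omega
          rw [if_pos c1, if_neg c2]

theorem pick_eq (cands : List (List (String × String))) :
    pick_three_diverse cands = pick_three_diverse_alt cands := by
  unfold pick_three_diverse pick_three_diverse_alt
  rw [show ((["market", "policy", "tech"] : List String).foldl
        (fun (s : List (List (String × String)) × PySem.Set String) b => pvBucketScanA b cands s.1 s.2)
        ([], PySem.Set.empty))
      = (["market", "policy", "tech"] : List String).foldl (pvBucketStepB (pvGroups cands))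
        ([], PySem.Set.empty) from by
    simp only [List.foldl_cons, List.foldl_nil, pvBucketStep_eq]]
  set s := (["market", "policy", "tech"] : List String).foldl (pvBucketStepB (pvGroups cands))
      ([], PySem.Set.empty) with hs
  have hlen : s.1.length ≤ 3 := by
    have h1 : ∀ (t : List (List (String × String)) × PySem.Set String) b,
        (pvBucketStepB (pvGroups cands) t b).1.length ≤ t.1.length + 1 := by
      intro t b
      rw [← pvBucketStep_eq]
      exact pvBucketScanA_len b cands t.1 t.2
    rw [hs]
    simp only [List.foldl_cons, List.foldl_nil]
    have a1 := h1 ([], PySem.Set.empty) "market"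
    have a2 := h1 (pvBucketStepB (pvGroups cands) ([], PySem.Set.empty) "market") "policy"
    have a3 := h1 (pvBucketStepB (pvGroups cands)
      (pvBucketStepB (pvGroups cands) ([], PySem.Set.empty) "market") "policy") "tech"
    simp only [List.length_nil] at a1
    omega
  rw [pvFill_eq cands s.1 s.2 hlen]

-- ===== VERDICT (by name: the statement is the Claim_ definition above) =====
theorem pick_three_diverse_spec : Claim_equal_pick_three_diverse := by
  intro cands _ _
  unfold Spec_pick_three_diverse
  exact pick_eq cands
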